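-- pv_equiv track=rewrite | github.com/BillPei/tensorflow_nlp_qa_with_cnn | ec_helpers.py | encode_sent
-- ===== SOURCE A (Python) =====
-- import string
--
-- def encode_sent(vocab, sentence):
--     x = []
--     translator = str.maketrans('', '', string.punctuation)
--     words = sentence.lower().translate(translator).split(' ')
--     for i in range(0, 200):
--         if ((len(words))<=i) or (words[i] not in vocab):
--             x.append(vocab['UNKNOWN'])
--         else:
--             x.append(vocab[words[i]])
--     return x
-- ===== SOURCE B (Python) =====
-- import string
--
-- def encode_sent(vocab, sentence):
--     words = sentence.lower().translate(str.maketrans('', '', string.punctuation)).split(' ')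
--
--     def go(ws, n):
--         if n == 0:
--             return []
--         if ws:
--             w = ws[0]
--             head = vocab[w] if w in vocab else vocab['UNKNOWN']
--             return [head] + go(ws[1:], n - 1)
--         return [vocab['UNKNOWN']] * n
--
--     return go(words, 200)
-- ===== Notes on version B (the rewrite author's own statement) =====
-- stated objective: alternative
-- what changed: Replaces A's 200-iteration index loop with per-slot bounds checks by a structural recursion that consumes the word list element by element with a countdown and, once the words run out, emits the whole UNKNOWN tail in a single replicate step.
-- outside the precondition, e.g. on encode_sent({'a': 1}, 'b'): A raises KeyError, B raises KeyError
import Mathlib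
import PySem

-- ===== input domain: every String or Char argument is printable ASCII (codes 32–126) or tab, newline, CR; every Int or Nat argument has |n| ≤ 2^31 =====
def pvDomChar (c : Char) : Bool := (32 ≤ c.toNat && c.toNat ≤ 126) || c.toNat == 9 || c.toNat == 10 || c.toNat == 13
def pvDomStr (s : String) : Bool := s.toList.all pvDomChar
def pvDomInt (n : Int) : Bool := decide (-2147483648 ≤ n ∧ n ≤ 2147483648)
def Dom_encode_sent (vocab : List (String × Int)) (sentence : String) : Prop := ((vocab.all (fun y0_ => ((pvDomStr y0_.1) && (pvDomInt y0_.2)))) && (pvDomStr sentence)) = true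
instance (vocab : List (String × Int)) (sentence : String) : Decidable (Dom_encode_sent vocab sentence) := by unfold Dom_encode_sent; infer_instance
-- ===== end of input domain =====

-- B replaces A's 200-iteration index loop by a structural recursion consuming the word list with a countdown, emitting the UNKNOWN tail as one replicate (objective: alternative).


-- string.punctuation (exact ASCII constant)
def pvPunct : List Char := "!\"#$%&'()*+,-./:;<=>?@[\\]^_`{|}~".toList

-- shared preprocessing line of both Pythons:
-- sentence.lower().translate(str.maketrans('', '', string.punctuation)).split(' ')
-- (translate deleting a char set is ported by hand as a filter; exact on the ASCII domain)
def pvWords (sentence : String) : List String :=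
  (PySem.Chars.splitOn ((PySem.Str.lower sentence).toList.filter (fun c => !pvPunct.contains c)) [' ']).map String.mk

-- ===== PORT A =====
-- the vocab dict lookups; under Pre_ every performed lookup hits a key (Python raises otherwise)
def encode_sent (vocab : List (String × Int)) (sentence : String) : List Int :=
  let d : PySem.Dict String Int := PySem.Dict.mk vocab
  let words := pvWords sentence
  (PySem.List.pyRange 0 200 1).foldl
    (fun x i =>
      if ((words.length : Int) ≤ i) || !(d.contains (PySem.List.pyGetD words i "")) then
        x ++ [d.getD "UNKNOWN" 0]
      else
        x ++ [d.getD (PySem.List.pyGetD words i "") 0]) []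

-- ===== PORT B =====
-- B's inner recursion go(ws, n): n == 0 → []; nonempty ws → looked-up head consed on go(ws[1:], n-1);
-- empty ws → [vocab['UNKNOWN']] * n
def pvGo (d : PySem.Dict String Int) : List String → Nat → List Int
  | _, 0 => []
  | w :: rest, Nat.succ n =>
      (if d.contains w then d.getD w 0 else d.getD "UNKNOWN" 0) :: pvGo d rest n
  | [], Nat.succ n => List.replicate (n + 1) (d.getD "UNKNOWN" 0)

def encode_sent_alt (vocab : List (String × Int)) (sentence : String) : List Int :=
  pvGo (PySem.Dict.mk vocab) (pvWords sentence) 200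

-- ===== PRECONDITION & SPEC =====
-- Pre_ excludes exactly the inputs where Python A raises KeyError: some of the 200 slots needs
-- vocab['UNKNOWN'] (a missing or out-of-vocab word) while 'UNKNOWN' is not a key.  B raises there too.
def Pre_encode_sent (vocab : List (String × Int)) (sentence : String) : Prop :=
  (PySem.Dict.mk vocab).contains "UNKNOWN" = true ∨
  (200 ≤ (pvWords sentence).length ∧
    ∀ w ∈ (pvWords sentence).take 200, (PySem.Dict.mk vocab).contains w = true)
instance (vocab : List (String × Int)) (sentence : String) : Decidable (Pre_encode_sent vocab sentence) := by unfold Pre_encode_sent; infer_instance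

def pvWitness_encode_sent : (List (String × Int)) × String := ([("UNKNOWN", 0), ("hi", 3)], "hi there")

def Spec_encode_sent (vocab : List (String × Int)) (sentence : String) (out : List Int) : Prop := out = encode_sent_alt vocab sentence
instance (vocab : List (String × Int)) (sentence : String) (out : List Int) : Decidable (Spec_encode_sent vocab sentence out) := by unfold Spec_encode_sent; infer_instance

-- ===== CLAIM (what is proved, stated in full; the proofs are below) =====
def Claim_equal_encode_sent : Prop := ∀ (vocab : List (String × Int)) (sentence : String), Dom_encode_sent vocab sentence → Pre_encode_sent vocab sentence → Spec_encode_sent vocab sentence (encode_sent vocab sentence)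

-- ===== LEMMAS AND PROOFS =====

-- A's loop, seen as a map over range n, splits into word lookups then padding.
theorem pvRangeMap_split {α : Type} (e : α → Int) (u : Int) (ws : List α) (f : Nat → Int)
    (h1 : ∀ (k : Nat) (hk : k < ws.length), f k = e ws[k])
    (h2 : ∀ k : Nat, ws.length ≤ k → f k = u) (n : Nat) :
    (List.range n).map f = (ws.take n).map e ++ List.replicate (n - ws.length) u := by
  induction n with
  | zero => simp
  | succ n ih =>
    rw [List.range_succ, List.map_append, ih, List.map_cons, List.map_nil]
    by_cases hn : n < ws.length
    · have h0 : n - ws.length = 0 := by omega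
      have h0' : n + 1 - ws.length = 0 := by omega
      rw [h1 n hn, h0, h0']
      have hstep : List.take (n+1) (List.map e ws) = List.take n (List.map e ws) ++ [e ws[n]] := by
        rw [List.take_add_one]
        simp [List.getElem?_map, List.getElem?_eq_getElem hn]
      simp [hstep]
    · push_neg at hn
      rw [h2 n hn]
      have h1' : n + 1 - ws.length = (n - ws.length) + 1 := by omega
      rw [h1', List.replicate_succ']
      have ht : ws.take (n+1) = ws.take n := by
        rw [List.take_of_length_le (by omega), List.take_of_length_le (by omega)]
      rw [ht, List.append_assoc]

-- A's loop equals the map-then-pad canonical form, bound kept symbolic.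
theorem pvA_canon (d : PySem.Dict String Int) (ws : List String) (n : Nat) :
    (PySem.List.pyRange 0 (n : Int) 1).foldl
      (fun x i =>
        if ((ws.length : Int) ≤ i) || !(d.contains (PySem.List.pyGetD ws i "")) then
          x ++ [d.getD "UNKNOWN" 0]
        else x ++ [d.getD (PySem.List.pyGetD ws i "") 0]) []
    = (ws.take n).map (fun w => if d.contains w then d.getD w 0 else d.getD "UNKNOWN" 0)
      ++ List.replicate (n - ws.length) (d.getD "UNKNOWN" 0) := by
  set u : Int := d.getD "UNKNOWN" 0 with hu
  set e : String → Int := fun w => if d.contains w then d.getD w 0 else u with he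
  have hfun : (fun (x : List Int) (i : Int) =>
      if ((ws.length : Int) ≤ i) || !(d.contains (PySem.List.pyGetD ws i "")) then
        x ++ [u] else x ++ [d.getD (PySem.List.pyGetD ws i "") 0])
      = (fun (x : List Int) (i : Int) => x ++
        [if ((ws.length : Int) ≤ i) || !(d.contains (PySem.List.pyGetD ws i "")) then
          u else d.getD (PySem.List.pyGetD ws i "") 0]) := by
    funext x i
    by_cases h : ((ws.length : Int) ≤ i) || !(d.contains (PySem.List.pyGetD ws i "")) <;> simp [h]
  rw [hfun, PySem.List.foldl_append_singleton_eq_map, List.nil_append, PySem.List.pyRange_one]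
  have hn0 : ((n : Int) - 0).toNat = n := by omega
  rw [hn0, List.map_map]
  exact pvRangeMap_split e u ws
    ((fun i => if ((ws.length : Int) ≤ i) || !(d.contains (PySem.List.pyGetD ws i "")) then
        u else d.getD (PySem.List.pyGetD ws i "") 0) ∘ (fun k : Nat => 0 + (k : Int)))
    (by
      intro k hk
      have hkz : ((0 : Int) + (k : Int)) = (k : Int) := by omega
      simp only [Function.comp, hkz, PySem.List.pyGetD_natCast]
      have hlt : ¬ ((ws.length : Int) ≤ (k : Int)) := by exact_mod_cast Nat.not_le.mpr hk
      rw [List.getD_eq_getElem ws "" hk]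
      by_cases hc : d.contains ws[k] <;> simp [hlt, hc, he])
    (by
      intro k hkge
      have hkz : ((0 : Int) + (k : Int)) = (k : Int) := by omega
      have hle : ((ws.length : Int) ≤ (k : Int)) := by exact_mod_cast hkge
      simp [Function.comp, hkz, hle])
    n

-- B's recursion equals the same map-then-pad canonical form.
theorem pvGo_canon (d : PySem.Dict String Int) (ws : List String) (n : Nat) :
    pvGo d ws n
    = (ws.take n).map (fun w => if d.contains w then d.getD w 0 else d.getD "UNKNOWN" 0)
      ++ List.replicate (n - ws.length) (d.getD "UNKNOWN" 0) := by
  induction n generalizing ws with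
  | zero => simp [pvGo]
  | succ n ih =>
    cases ws with
    | nil => simp [pvGo]
    | cons w rest =>
      simp only [pvGo, ih rest, List.take_succ_cons, List.map_cons, List.cons_append,
        List.length_cons]
      rw [Nat.succ_sub_succ]

theorem encode_sent_eq_alt (vocab : List (String × Int)) (sentence : String) :
    encode_sent vocab sentence = encode_sent_alt vocab sentence := by
  have hA := pvA_canon (PySem.Dict.mk vocab) (pvWords sentence) 200
  have hB := pvGo_canon (PySem.Dict.mk vocab) (pvWords sentence) 200
  simp only [Nat.cast_ofNat] at hA
  unfold encode_sent encode_sent_alt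
  rw [hA, hB]

-- ===== VERDICT (by name: the statement is the Claim_ definition above) =====
theorem encode_sent_spec : Claim_equal_encode_sent := by
  intro vocab sentence _ _
  unfold Spec_encode_sent
  exact encode_sent_eq_alt vocab sentence
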